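-- pv_equiv track=rewrite | github.com/Shriyanshu2004/Svarachandas | utils/chandas.py | get_durations
-- ===== SOURCE A (Python) =====
-- def get_durations(pattern):
--     durations = []
--
--     for i, p in enumerate(pattern):
--         if p == "L":
--             durations.append(400)
--         else:
--             durations.append(700)
--
--         # pause after each 8 syllables (like shloka)
--         if i % 8 == 7:
--             durations[-1] += 300
--
--     return durations
-- ===== SOURCE B (Python) =====
-- def get_durations(pattern):
--     # process the pattern in blocks of 8 syllables; a complete block carries the
--     # shloka pause on its last syllable
--     out = []
--     for k in range(0, len(pattern), 8):
--         block = [400 if p == "L" else 700 for p in pattern[k:k+8]]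
--         if len(block) == 8:
--             block[-1] += 300
--         out += block
--     return out
-- ===== Notes on version B (the rewrite author's own statement) =====
-- stated objective: alternative
-- what changed: B processes the pattern in blocks of 8 syllables (for each block of 8, build its base durations from the slice and add the pause to the last syllable of every complete block), replacing A's per-syllable loop that checks i % 8 == 7 on each element.
import Mathlib
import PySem

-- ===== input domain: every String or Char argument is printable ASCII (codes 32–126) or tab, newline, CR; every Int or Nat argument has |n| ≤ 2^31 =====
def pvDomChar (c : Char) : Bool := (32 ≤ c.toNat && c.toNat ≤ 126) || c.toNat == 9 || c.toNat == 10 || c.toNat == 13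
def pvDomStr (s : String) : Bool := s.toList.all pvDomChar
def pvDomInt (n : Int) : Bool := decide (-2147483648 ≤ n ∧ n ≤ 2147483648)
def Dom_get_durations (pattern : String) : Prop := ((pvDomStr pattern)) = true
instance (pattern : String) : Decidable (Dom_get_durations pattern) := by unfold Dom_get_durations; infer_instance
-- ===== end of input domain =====

-- B processes the pattern in blocks of 8 syllables (a complete block carries the pause on its
-- last syllable) instead of A's per-syllable loop with an i % 8 == 7 check (objective: alternative).

-- ===== PORT A =====
def get_durations (pattern : String) : List Int :=
  (PySem.List.enumerate pattern.toList).foldl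
    (fun durations ip =>
      let durations := durations ++ [if ip.2 == 'L' then (400 : Int) else 700]
      if ip.1 % 8 == 7 then
        PySem.List.pySetD durations (-1) (PySem.List.pyGetD durations (-1) 0 + 300)
      else durations)
    []

-- ===== PORT B =====
def get_durations_alt (pattern : String) : List Int :=
  (PySem.List.pyRange 0 (pattern.toList.length : Int) 8).foldl
    (fun out k =>
      let block := (PySem.List.slice pattern.toList (some k) (some (k + 8))).map
        (fun p => if p == 'L' then (400 : Int) else 700)
      let block := if block.length == 8 then
          PySem.List.pySetD block (-1) (PySem.List.pyGetD block (-1) 0 + 300)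
        else block
      out ++ block)
    []

-- ===== PRECONDITION & SPEC =====
def Spec_get_durations (pattern : String) (out : List Int) : Prop := out = get_durations_alt pattern
instance (pattern : String) (out : List Int) : Decidable (Spec_get_durations pattern out) := by unfold Spec_get_durations; infer_instance

-- ===== CLAIM (what is proved, stated in full; the proofs are below) =====
def Claim_equal_get_durations : Prop := ∀ (pattern : String), Dom_get_durations pattern → Spec_get_durations pattern (get_durations pattern)

-- ===== LEMMAS AND PROOFS =====

-- base duration of a syllable, and duration at (0-based) position i
def pvBase (p : Char) : Int := if p == 'L' then 400 else 700

def pvDur (i : Int) (p : Char) : Int :=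
  pvBase p + (if i % 8 == 7 then 300 else 0)

-- the common characterisation both ports are reduced to
def pvTgt (l : List Char) : List Int :=
  l.zipIdx.map (fun q => pvDur (q.2 : Int) q.1)

-- B's block at the front of a (suffix of the) pattern
def pvBlk (l : List Char) : List Int :=
  let b := (l.take 8).map pvBase
  if b.length == 8 then
    PySem.List.pySetD b (-1) (PySem.List.pyGetD b (-1) 0 + 300)
  else b

theorem pvSetD_neg_one_append (xs : List Int) (x v : Int) :
    PySem.List.pySetD (xs ++ [x]) (-1) v = xs ++ [v] := by
  simp [PySem.List.pySetD, PySem.List.pySet?, PySem.List.pyIdx?]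

-- A's loop body appends exactly one element of value pvDur
theorem pvA_step_eq :
    (fun (durations : List Int) (ip : Int × Char) =>
      let durations := durations ++ [if ip.2 == 'L' then (400 : Int) else 700]
      if ip.1 % 8 == 7 then
        PySem.List.pySetD durations (-1) (PySem.List.pyGetD durations (-1) 0 + 300)
      else durations)
    = fun d ip => d ++ [pvDur ip.1 ip.2] := by
  funext d ip
  dsimp only
  cases h : (ip.1 % 8 == 7) with
  | true =>
    rw [if_pos rfl]
    rw [PySem.List.pyGetD_neg_one_append_singleton, pvSetD_neg_one_append]
    simp [pvDur, pvBase, h]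
  | false =>
    simp [pvDur, pvBase, h]

-- A equals the common characterisation
theorem pvA_eq (pattern : String) : get_durations pattern = pvTgt pattern.toList := by
  unfold get_durations pvTgt
  rw [pvA_step_eq, PySem.List.foldl_append_singleton_eq_map,
      PySem.List.enumerate_eq_zipIdx_map, List.map_map]
  simp

-- the first block is the target of the first ≤8 syllables
theorem pvHead (l : List Char) :
    ((l.take 8).zipIdx.map (fun q => pvDur (q.2 : Int) q.1)) = pvBlk l := by
  by_cases h8 : 8 ≤ l.length
  · rcases l with _ | ⟨a, _ | ⟨b, _ | ⟨c, _ | ⟨d, _ | ⟨e, _ | ⟨f, _ | ⟨g, _ | ⟨h, rest⟩⟩⟩⟩⟩⟩⟩⟩ <;>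
      simp at h8
    simp [pvBlk, pvDur, pvBase, List.zipIdx_cons,
      PySem.List.pySetD, PySem.List.pySet?, PySem.List.pyIdx?,
      PySem.List.pyGetD, PySem.List.pyGet?]
  · rw [List.take_of_length_le (by omega)]
    have hb : pvBlk l = l.map pvBase := by
      unfold pvBlk
      rw [List.take_of_length_le (by omega)]
      simp only [List.length_map]
      rw [if_neg (by simp; omega)]
    rw [hb]
    have : ∀ q ∈ l.zipIdx, pvDur (q.2 : Int) q.1 = pvBase q.1 := by
      intro q hq
      have := List.snd_lt_add_of_mem_zipIdx hq
      unfold pvDur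
      rw [if_neg (by simp; omega)]
      omega
    rw [List.map_congr_left this]
    calc l.zipIdx.map (fun q => pvBase q.1)
        = (l.zipIdx.map Prod.fst).map pvBase := by rw [List.map_map]; rfl
      _ = l.map pvBase := by rw [List.zipIdx_map_fst]

-- pvDur only depends on the index mod 8
theorem pvDur_add_eight (i : Nat) (p : Char) : pvDur ((i + 8 : Nat) : Int) p = pvDur (i : Int) p := by
  unfold pvDur
  have : (((i + 8 : Nat) : Int) % 8 == 7) = (((i : Nat) : Int) % 8 == 7) := by
    push_cast
    by_cases h : ((i : Int) % 8 = 7)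
    · rw [beq_iff_eq.2 (by omega), beq_iff_eq.2 h]
    · rw [beq_eq_false_iff_ne.2 (by omega), beq_eq_false_iff_ne.2 h]
  rw [this]

-- shifting the start index by 8 does not change the durations
theorem pvShift (d : List Char) :
    (d.zipIdx 8).map (fun q => pvDur (q.2 : Int) q.1) = pvTgt d := by
  rw [List.zipIdx_eq_map_add, List.map_map]
  unfold pvTgt
  refine List.map_congr_left ?_
  intro q _
  show pvDur ((8 + q.2 : Nat) : Int) q.1 = pvDur (q.2 : Int) q.1
  rw [show (8 + q.2 : Nat) = q.2 + 8 from by omega]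
  exact pvDur_add_eight q.2 q.1

-- peeling one block of 8 off the target
theorem pvTgt_chunk (l : List Char) : pvBlk l ++ pvTgt (l.drop 8) = pvTgt l := by
  conv_rhs => rw [← List.take_append_drop 8 l]
  unfold pvTgt
  rw [List.zipIdx_append, List.map_append, pvHead]
  congr 1
  by_cases h8 : 8 ≤ l.length
  · have hlen : (l.take 8).length = 8 := by simp; omega
    rw [hlen]
    exact (pvShift (l.drop 8)).symm
  · have : l.drop 8 = [] := by
      rw [List.drop_eq_nil_iff]
      omega
    simp [this]

-- the chunk decomposition of the target
theorem pvChunks : ∀ (m : Nat) (l : List Char), (l.length + 7) / 8 = m →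
    (List.range m).flatMap (fun c => pvBlk (l.drop (8 * c))) = pvTgt l := by
  intro m
  induction m with
  | zero =>
    intro l hl
    have : l.length = 0 := by omega
    rw [List.length_eq_zero_iff] at this
    subst this
    simp [pvTgt]
  | succ m ih =>
    intro l hl
    rw [List.range_succ_eq_map, List.flatMap_cons, List.flatMap_map]
    have hdrop : ∀ c : Nat, l.drop (8 * Nat.succ c) = (l.drop 8).drop (8 * c) := by
      intro c
      rw [List.drop_drop]
      congr 1
      omega
    have hrec : (List.range m).flatMap (fun a => pvBlk (l.drop (8 * a.succ)))
        = pvTgt (l.drop 8) := by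
      rw [← ih (l.drop 8) (by simp; omega)]
      congr 1
      funext c
      rw [hdrop c]
    rw [hrec]
    simp only [Nat.mul_zero, List.drop_zero]
    exact pvTgt_chunk l

-- B equals the chunk decomposition
theorem pvB_eq (pattern : String) :
    get_durations_alt pattern
      = (List.range ((pattern.toList.length + 7) / 8)).flatMap
          (fun c => pvBlk (pattern.toList.drop (8 * c))) := by
  unfold get_durations_alt
  set l := pattern.toList with hl
  have hbody : (fun (out : List Int) (k : Int) =>
      let block := (PySem.List.slice l (some k) (some (k + 8))).map
        (fun p => if p == 'L' then (400 : Int) else 700)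
      let block := if block.length == 8 then
          PySem.List.pySetD block (-1) (PySem.List.pyGetD block (-1) 0 + 300)
        else block
      out ++ block)
      = (fun out k => out ++ (fun k =>
          let block := (PySem.List.slice l (some k) (some (k + 8))).map
            (fun p => if p == 'L' then (400 : Int) else 700)
          if block.length == 8 then
            PySem.List.pySetD block (-1) (PySem.List.pyGetD block (-1) 0 + 300)
          else block) k) := rfl
  rw [hbody, PySem.List.foldl_append_eq_flatMap, List.nil_append]
  rw [PySem.List.pyRange_of_pos 0 (l.length : Int) (by norm_num)]
  rw [List.flatMap_map]
  have hcnt : (if (0 : Int) < (l.length : Int) then (((l.length : Int) - 0 + 8 - 1) / 8).toNat else 0)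
      = (l.length + 7) / 8 := by
    by_cases h : 0 < l.length
    · rw [if_pos (by exact_mod_cast h)]
      have : ((l.length : Int) - 0 + 8 - 1) = ((l.length + 7 : Nat) : Int) := by push_cast; ring
      rw [this]
      omega
    · rw [if_neg (by omega)]
      omega
  rw [hcnt]
  congr 1
  funext c
  have hk : (0 : Int) + 8 * (c : Nat) = ((8 * c : Nat) : Int) := by push_cast; ring
  have hk8 : (0 : Int) + 8 * (c : Nat) + 8 = ((8 * c : Nat) : Int) + ((8 : Nat) : Int) := by
    push_cast; ring
  rw [hk8, hk, PySem.List.slice_natCast_add l (8 * c) 8]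
  unfold pvBlk pvBase
  rw [List.take_drop]

-- ===== VERDICT (by name: the statement is the Claim_ definition above) =====
theorem get_durations_spec : Claim_equal_get_durations := by
  intro pattern _
  unfold Spec_get_durations
  rw [pvA_eq, pvB_eq, pvChunks ((pattern.toList.length + 7) / 8) pattern.toList rfl]
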